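-- pv_equiv track=rewrite | github.com/Kobe972/piano_fingering_generator | brute.py | difficulty_compound
-- ===== SOURCE A (Python) =====
-- def difficulty_compound(fingering,part):
--     #用于评估组合后的指法
--     result=0
--     first=0
--     second=1
--     while second<len(fingering):
--         if fingering[first]==0:
--             first+=1
--             second=max(second,first+1)
--             continue
--         if fingering[second]==0:
--             second+=1
--             continue
--         if fingering[second]>fingering[first]: #正常相对顺序
--             result+=abs(fingering[second]-fingering[first]-(second-first))
--             first+=1
--             second=max(second,first+1)
--             continue
--         else:
--             if first==(0 if part==0 else 4): #穿指动作合法化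
--                 if abs(fingering[second]-fingering[first]-(second-first))>0 and abs(fingering[second]-fingering[first]-(second-first))<5:
--                     result+=2
--                 elif abs(fingering[second]-fingering[first]-(second-first))>=5:
--                     result+=min(abs(fingering[second]-fingering[first]-(second-first)),15)
--             elif abs(fingering[second]-fingering[first]-(second-first))>7:
--                 result+=15
--                 return result
--             else:
--                 result+=2*abs(fingering[second]-fingering[first]-(second-first))
--             first+=1
--             second=max(second,first+1)
--     return result
-- ===== SOURCE B (Python) =====
-- def pair_score(p, pv, q, qv, special):
--     # pure score for one consecutive non-zero pair: (points, stop?)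
--     d = abs(qv - pv - (q - p))
--     if qv > pv:
--         return (d, False)
--     if p == special:
--         if 0 < d < 5:
--             return (2, False)
--         return (min(d, 15) if d >= 5 else 0, False)
--     if d > 7:
--         return (15, True)
--     return (2 * d, False)
--
-- def difficulty_compound(fingering, part):
--     special = 0 if part == 0 else 4
--     nz = [(i, v) for i, v in enumerate(fingering) if v != 0]
--     steps = [pair_score(p, pv, q, qv, special)
--              for (p, pv), (q, qv) in zip(nz, nz[1:])]
--     cut = next((k + 1 for k, (_, stop) in enumerate(steps) if stop), len(steps))
--     return sum(pts for pts, _ in steps[:cut])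
-- ===== Notes on version B (the rewrite author's own statement) =====
-- stated objective: alternative
-- what changed: Replaces A's stateful two-pointer while-loop (mutating pointers, zero-skipping, mid-loop early return) by staged passes: collect non-zero (index,value) pairs, map a pure pair-scoring function over consecutive pairs to a list of (points, stop) steps, locate the first stop with next()/enumerate, and sum the prefix of points up to it.
import Mathlib
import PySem

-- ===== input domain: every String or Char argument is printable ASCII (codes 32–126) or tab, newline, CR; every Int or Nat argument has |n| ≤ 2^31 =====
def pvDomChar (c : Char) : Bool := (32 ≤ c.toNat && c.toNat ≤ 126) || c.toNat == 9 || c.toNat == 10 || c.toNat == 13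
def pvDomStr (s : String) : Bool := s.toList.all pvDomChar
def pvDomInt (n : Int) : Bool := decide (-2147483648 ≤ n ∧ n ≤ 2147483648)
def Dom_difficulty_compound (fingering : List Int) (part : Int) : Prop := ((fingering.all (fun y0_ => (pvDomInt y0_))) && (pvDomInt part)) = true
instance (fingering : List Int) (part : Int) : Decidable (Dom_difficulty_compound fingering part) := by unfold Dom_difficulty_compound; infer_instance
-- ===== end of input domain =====

-- B replaces A's stateful two-pointer while-loop (with mid-loop early return) by staged
-- passes: enumerate-and-filter the non-zero pairs, map a pure scoring function over
-- consecutive pairs, cut at the first stop step, sum the prefix (objective: alternative).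

-- ===== PORT A =====
-- A's while-loop; the loop invariant first < second ≤ len keeps every access in range,
-- so `getD` is exact for Python's `fingering[i]`. The loop is run on a fuel bound
-- 2*len+2, which exceeds the loop's decreasing measure (len-first)+(len-second),
-- so the fuel never runs out (the guard only makes the same computation total).
def dcLoopA (f : List Int) (part : Int) : Nat → Int → Nat → Nat → Int
  | 0, result, _, _ => result
  | fuel + 1, result, first, second =>
    if second < f.length then
      if f.getD first 0 = 0 then
        dcLoopA f part fuel result (first + 1) (max second (first + 2))
      else if f.getD second 0 = 0 then
        dcLoopA f part fuel result first (second + 1)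
      else if f.getD second 0 > f.getD first 0 then
        dcLoopA f part fuel (result + |f.getD second 0 - f.getD first 0 - ((second : Int) - first)|)
          (first + 1) (max second (first + 2))
      else
        if (first : Int) = (if part = 0 then 0 else 4) then
          if 0 < |f.getD second 0 - f.getD first 0 - ((second : Int) - first)| ∧
             |f.getD second 0 - f.getD first 0 - ((second : Int) - first)| < 5 then
            dcLoopA f part fuel (result + 2) (first + 1) (max second (first + 2))
          else if |f.getD second 0 - f.getD first 0 - ((second : Int) - first)| ≥ 5 then
            dcLoopA f part fuel
              (result + min |f.getD second 0 - f.getD first 0 - ((second : Int) - first)| 15)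
              (first + 1) (max second (first + 2))
          else
            dcLoopA f part fuel result (first + 1) (max second (first + 2))
        else if |f.getD second 0 - f.getD first 0 - ((second : Int) - first)| > 7 then
          result + 15
        else
          dcLoopA f part fuel
            (result + 2 * |f.getD second 0 - f.getD first 0 - ((second : Int) - first)|)
            (first + 1) (max second (first + 2))
    else
      result

def difficulty_compound (fingering : List Int) (part : Int) : Int :=
  dcLoopA fingering part (2 * fingering.length + 2) 0 0 1

-- ===== PORT B =====
-- Source B's pure pair_score helper: (points, stop?)
def pairScoreB (p pv q qv special : Int) : Int × Bool :=
  let d := |qv - pv - (q - p)|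
  if qv > pv then (d, false)
  else if p = special then
    if 0 < d ∧ d < 5 then (2, false)
    else (if d ≥ 5 then min d 15 else 0, false)
  else if d > 7 then (15, true)
  else (2 * d, false)

-- Source B staged: nz = enumerate+filter; steps = map over zip(nz, nz[1:]);
-- cut = next(k+1 for first stop, default len) ported as findIdx?; sum(steps[:cut]).
def difficulty_compound_alt (fingering : List Int) (part : Int) : Int :=
  let special : Int := if part = 0 then 0 else 4
  let nz := (PySem.List.enumerate fingering).filter (fun iv => decide (iv.2 ≠ 0))
  let steps := (nz.zip (nz.drop 1)).map (fun x => pairScoreB x.1.1 x.1.2 x.2.1 x.2.2 special)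
  let cut := match steps.findIdx? (fun s => s.2) with
             | some k => k + 1
             | none => steps.length
  ((steps.take cut).map Prod.fst).sum

-- ===== PRECONDITION & SPEC =====
def Spec_difficulty_compound (fingering : List Int) (part : Int) (out : Int) : Prop := out = difficulty_compound_alt fingering part
instance (fingering : List Int) (part : Int) (out : Int) : Decidable (Spec_difficulty_compound fingering part out) := by unfold Spec_difficulty_compound; infer_instance

-- ===== CLAIM (what is proved, stated in full; the proofs are below) =====
def Claim_equal_difficulty_compound : Prop := ∀ (fingering : List Int) (part : Int), Dom_difficulty_compound fingering part → Spec_difficulty_compound fingering part (difficulty_compound fingering part)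

-- ===== LEMMAS AND PROOFS =====

-- positions ≥ i holding a non-zero value
def nzFrom (f : List Int) (i : Nat) : List Nat :=
  (List.range' i (f.length - i)).filter (fun j => decide (f.getD j 0 ≠ 0))

-- proof-only reference scan over the non-zero positions (accumulator form)
def scanN (f : List Int) (part : Int) : List Nat → Int → Int
  | p :: q :: rest, acc =>
      let d := f.getD q 0 - f.getD p 0 - ((q : Int) - p)
      if f.getD q 0 > f.getD p 0 then
        scanN f part (q :: rest) (acc + |d|)
      else if (p : Int) = (if part = 0 then 0 else 4) then
        if 0 < |d| ∧ |d| < 5 then scanN f part (q :: rest) (acc + 2)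
        else if |d| ≥ 5 then scanN f part (q :: rest) (acc + min |d| 15)
        else scanN f part (q :: rest) acc
      else if |d| > 7 then acc + 15
      else scanN f part (q :: rest) (acc + 2 * |d|)
  | _, acc => acc

theorem nzFrom_stop (f : List Int) (i : Nat) (h : f.length ≤ i) : nzFrom f i = [] := by
  unfold nzFrom
  rw [Nat.sub_eq_zero_of_le h]
  rfl

theorem nzFrom_step (f : List Int) (i : Nat) (h : i < f.length) :
    nzFrom f i = (if f.getD i 0 ≠ 0 then [i] else []) ++ nzFrom f (i + 1) := by
  unfold nzFrom
  have : f.length - i = (f.length - (i + 1)) + 1 := by omega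
  rw [this, List.range'_succ, List.filter_cons]
  split_ifs with h1 h2 <;> simp_all

theorem scanN_short (f : List Int) (part : Int) (l : List Nat) (acc : Int)
    (h : l.length ≤ 1) : scanN f part l acc = acc := by
  match l with
  | [] => rfl
  | [a] => rfl
  | a :: b :: t => simp at h

-- after one advance of `first`, the pending pair list is unchanged
theorem step_list (f : List Int) (first second : Nat) (hfs : first < second)
    (h2 : second < f.length)
    (hz : ∀ i, first < i → i < second → f.getD i 0 = 0) :
    (if f.getD (first + 1) 0 ≠ 0 then [first + 1] else []) ++
      nzFrom f (max second (first + 2)) = nzFrom f second := by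
  rcases Nat.lt_or_ge (first + 1) second with h | h
  · have hm : max second (first + 2) = second := by omega
    have hzz := hz (first + 1) (by omega) h
    rw [hm]
    simp only [List.getD] at hzz
    simp [hzz]
  · have hse : second = first + 1 := by omega
    subst hse
    have hm : max (first + 1) (first + 2) = (first + 1) + 1 := by omega
    rw [hm, ← nzFrom_step f (first + 1) h2]

-- the core invariant: A's loop from state (first, second) computes the reference scan
-- over (first if non-zero) followed by the non-zero positions from second onwards,
-- provided every position strictly between first and second is zero
-- and the fuel exceeds the loop's decreasing measure.
theorem dcLoopA_eq_scan (f : List Int) (part : Int) (fuel : Nat) :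
    ∀ (result : Int) (first second : Nat),
    (f.length - first) + (f.length - second) < fuel →
    first < second →
    (∀ i, first < i → i < second → f.getD i 0 = 0) →
    dcLoopA f part fuel result first second =
      scanN f part
        ((if f.getD first 0 ≠ 0 then [first] else []) ++ nzFrom f second) result := by
  induction fuel with
  | zero =>
      intro result first second hfuel hfs hz
      omega
  | succ fuel ih =>
      intro result first second hfuel hfs hz
      rw [dcLoopA]
      by_cases h2 : second < f.length
      case neg =>
        rw [if_neg h2, nzFrom_stop f second (by omega)]
        refine (scanN_short f part _ result ?_).symm
        split_ifs <;> simp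
      rw [if_pos h2]
      by_cases h1 : f.getD first 0 = 0
      · rw [if_pos h1]
        rw [ih result (first + 1) (max second (first + 2)) (by omega) (by omega)
          (fun i a b => hz i (by omega) (by omega))]
        rw [step_list f first second hfs h2 hz]
        rw [if_neg (not_not_intro h1), List.nil_append]
      rw [if_neg h1]
      by_cases hs0 : f.getD second 0 = 0
      · rw [if_pos hs0]
        have hz' : ∀ i, first < i → i < second + 1 → f.getD i 0 = 0 := by
          intro i a b
          by_cases hc : i = second
          · rw [hc]; exact hs0
          · exact hz i a (by omega)
        rw [ih result first (second + 1) (by omega) (by omega) hz']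
        rw [nzFrom_step f second h2, if_neg (not_not_intro hs0), List.nil_append]
      rw [if_neg hs0]
      have hnz : nzFrom f second = second :: nzFrom f (second + 1) := by
        rw [nzFrom_step f second h2, if_pos hs0]; rfl
      have hstep := step_list f first second hfs h2 hz
      have hz2 : ∀ i, first + 1 < i → i < max second (first + 2) → f.getD i 0 = 0 :=
        fun i a b => hz i (by omega) (by omega)
      by_cases hgt : f.getD second 0 > f.getD first 0
      · rw [if_pos hgt]
        rw [ih _ (first + 1) (max second (first + 2)) (by omega) (by omega) hz2]
        rw [hstep, hnz, if_pos h1]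
        simp only [List.cons_append, List.nil_append, scanN]
        rw [if_pos hgt]
      rw [if_neg hgt]
      by_cases hsp : (first : Int) = (if part = 0 then 0 else 4)
      · rw [if_pos hsp]
        by_cases hd : 0 < |f.getD second 0 - f.getD first 0 - ((second : Int) - first)| ∧
            |f.getD second 0 - f.getD first 0 - ((second : Int) - first)| < 5
        · rw [if_pos hd]
          rw [ih _ (first + 1) (max second (first + 2)) (by omega) (by omega) hz2]
          rw [hstep, hnz, if_pos h1]
          simp only [List.cons_append, List.nil_append, scanN]
          rw [if_neg hgt, if_pos hsp, if_pos hd]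
        rw [if_neg hd]
        by_cases hd5 : |f.getD second 0 - f.getD first 0 - ((second : Int) - first)| ≥ 5
        · rw [if_pos hd5]
          rw [ih _ (first + 1) (max second (first + 2)) (by omega) (by omega) hz2]
          rw [hstep, hnz, if_pos h1]
          simp only [List.cons_append, List.nil_append, scanN]
          rw [if_neg hgt, if_pos hsp, if_neg hd, if_pos hd5]
        · rw [if_neg hd5]
          rw [ih _ (first + 1) (max second (first + 2)) (by omega) (by omega) hz2]
          rw [hstep, hnz, if_pos h1]
          simp only [List.cons_append, List.nil_append, scanN]
          rw [if_neg hgt, if_pos hsp, if_neg hd, if_neg hd5]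
      rw [if_neg hsp]
      by_cases hd7 : |f.getD second 0 - f.getD first 0 - ((second : Int) - first)| > 7
      · rw [if_pos hd7]
        rw [hnz, if_pos h1]
        simp only [List.cons_append, List.nil_append, scanN]
        rw [if_neg hgt, if_neg hsp, if_pos hd7]
      · rw [if_neg hd7]
        rw [ih _ (first + 1) (max second (first + 2)) (by omega) (by omega) hz2]
        rw [hstep, hnz, if_pos h1]
        simp only [List.cons_append, List.nil_append, scanN]
        rw [if_neg hgt, if_neg hsp, if_neg hd7]

theorem a_eq_scanN (f : List Int) (part : Int) :
    difficulty_compound f part = scanN f part (nzFrom f 0) 0 := by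
  unfold difficulty_compound
  rw [dcLoopA_eq_scan f part (2 * f.length + 2) 0 0 1 (by omega) (by omega) (by omega)]
  by_cases h0 : f.length = 0
  · rw [nzFrom_stop f 0 (by omega), nzFrom_stop f 1 (by omega)]
    have hg : f.getD 0 0 = 0 := by
      match f, h0 with
      | [], _ => rfl
    simp only [List.getD] at hg ⊢
    simp [hg]
  · rw [nzFrom_step f 0 (by omega)]

-- ===== relating the reference scan to B's staged pipeline =====

-- the "special" index of Source B
def specialOf (part : Int) : Int := if part = 0 then 0 else 4

-- recursive value of "sum of points up to and including the first stop step"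
def cutSum : List (Int × Bool) → Int
  | [] => 0
  | (pts, stop) :: ss => pts + (if stop then 0 else cutSum ss)

-- step list of the staged pipeline, expressed over Nat positions
def stepsN (f : List Int) (sp : Int) (l : List Nat) : List (Int × Bool) :=
  (l.zip (l.drop 1)).map
    (fun x => pairScoreB (x.1 : Int) (f.getD x.1 0) (x.2 : Int) (f.getD x.2 0) sp)

theorem stepsN_cons (f : List Int) (sp : Int) (p q : Nat) (rest : List Nat) :
    stepsN f sp (p :: q :: rest) =
      pairScoreB (p : Int) (f.getD p 0) (q : Int) (f.getD q 0) sp :: stepsN f sp (q :: rest) := by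
  simp [stepsN]

theorem scanN_eq_cutSum (f : List Int) (part : Int) (l : List Nat) (acc : Int) :
    scanN f part l acc = acc + cutSum (stepsN f (specialOf part) l) := by
  match l with
  | [] => simp [scanN, stepsN, cutSum, specialOf]
  | [a] => simp [scanN, stepsN, cutSum, specialOf]
  | p :: q :: rest =>
    rw [stepsN_cons]
    rw [scanN]
    simp only [pairScoreB, specialOf]
    by_cases hgt : f.getD q 0 > f.getD p 0
    · rw [if_pos hgt, if_pos hgt, scanN_eq_cutSum f part (q :: rest)]
      simp [cutSum, specialOf]; ring
    rw [if_neg hgt, if_neg hgt]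
    by_cases hsp : (p : Int) = (if part = 0 then 0 else 4)
    · rw [if_pos hsp, if_pos hsp]
      by_cases hd : 0 < |f.getD q 0 - f.getD p 0 - ((q : Int) - p)| ∧
          |f.getD q 0 - f.getD p 0 - ((q : Int) - p)| < 5
      · rw [if_pos hd, if_pos hd, scanN_eq_cutSum f part (q :: rest)]
        simp [cutSum, specialOf]; ring
      rw [if_neg hd, if_neg hd]
      by_cases hd5 : |f.getD q 0 - f.getD p 0 - ((q : Int) - p)| ≥ 5
      · rw [if_pos hd5, if_pos hd5, scanN_eq_cutSum f part (q :: rest)]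
        simp [cutSum, specialOf]; ring
      · rw [if_neg hd5, if_neg hd5, scanN_eq_cutSum f part (q :: rest)]
        simp [cutSum, specialOf]
    rw [if_neg hsp, if_neg hsp]
    by_cases hd7 : |f.getD q 0 - f.getD p 0 - ((q : Int) - p)| > 7
    · rw [if_pos hd7, if_pos hd7]
      simp [cutSum]
    · rw [if_neg hd7, if_neg hd7, scanN_eq_cutSum f part (q :: rest)]
      simp [cutSum, specialOf]; ring

-- B's cut/take/sum combination computes cutSum
theorem takeCut_eq_cutSum (steps : List (Int × Bool)) :
    ((steps.take (match steps.findIdx? (fun s => s.2) with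
                  | some k => k + 1
                  | none => steps.length)).map Prod.fst).sum = cutSum steps := by
  match steps with
  | [] => rfl
  | (pts, stop) :: ss =>
    rw [List.findIdx?_cons]
    by_cases hs : stop
    · simp [hs, cutSum]
    · have hrec := takeCut_eq_cutSum ss
      rcases hss : ss.findIdx? (fun s => s.2) with _ | k <;>
        rw [hss] at hrec <;>
        simp [hs, hss, cutSum, ← hrec, List.take_succ_cons]

-- B's enumerate+filter equals the Nat position list with its stored values
theorem enumFilter_eq (f : List Int) : ∀ (g : List Int) (i : Nat), g = f.drop i →
    (PySem.List.enumerate g (i : Int)).filter (fun iv => decide (iv.2 ≠ 0)) =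
      (nzFrom f i).map (fun (j : Nat) => ((j : Int), f.getD j 0)) := by
  intro g
  induction g with
  | nil =>
    intro i hg
    have : f.length ≤ i := by
      have := congrArg List.length hg
      simp [List.length_drop] at this
      omega
    rw [nzFrom_stop f i this]
    rfl
  | cons x xs ih =>
    intro i hg
    have hi : i < f.length := by
      by_contra h
      rw [List.drop_eq_nil_of_le (by omega)] at hg
      exact absurd hg (by simp)
    have hx : f.getD i 0 = x := by
      have := congrArg (fun l => l.getD 0 0) hg
      simpa [List.getD, List.getElem?_drop] using this.symm
    have hxs : xs = f.drop (i + 1) := by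
      have := congrArg (fun l => l.drop 1) hg
      simpa using this
    rw [PySem.List.enumerate_cons, List.filter_cons, nzFrom_step f i hi]
    have : ((i : Int) + 1) = ((i + 1 : Nat) : Int) := by push_cast; ring
    rw [this, ih (i + 1) hxs]
    simp only [List.getD] at hx
    by_cases hx0 : x = 0
    · simp [hx, hx0, List.getD]
    · simp [hx, hx0, List.getD]

-- zip/drop of the mapped list pushed inside the map
theorem zip_drop_map (f : List Int) (l : List Nat) (sp : Int) :
    (((l.map (fun (j : Nat) => ((j : Int), f.getD j 0))).zip
        ((l.map (fun (j : Nat) => ((j : Int), f.getD j 0))).drop 1)).map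
      (fun x => pairScoreB x.1.1 x.1.2 x.2.1 x.2.2 sp)) = stepsN f sp l := by
  simp only [stepsN, ← List.map_drop, List.zip_map, List.map_map]
  rfl

theorem alt_eq_cutSum (f : List Int) (part : Int) :
    difficulty_compound_alt f part = cutSum (stepsN f (specialOf part) (nzFrom f 0)) := by
  have he : (PySem.List.enumerate f).filter (fun iv => decide (iv.2 ≠ 0)) =
      (nzFrom f 0).map (fun (j : Nat) => ((j : Int), f.getD j 0)) := by
    simpa using enumFilter_eq f f 0 rfl
  have hsp : (if part = 0 then (0 : Int) else 4) = specialOf part := rfl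
  simp only [difficulty_compound_alt, hsp, he, zip_drop_map, takeCut_eq_cutSum]

-- ===== VERDICT (by name: the statement is the Claim_ definition above) =====
theorem difficulty_compound_spec : Claim_equal_difficulty_compound := by
  intro f part _
  unfold Spec_difficulty_compound
  rw [a_eq_scanN, alt_eq_cutSum, scanN_eq_cutSum]
  simp
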